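-- pv_equiv track=rewrite | github.com/StuartRiffle/new-math | gif-prover.py | make_grid_indices
-- ===== SOURCE A (Python) =====
-- def make_grid_indices(width, height, odds_mode):
--     """
--     Returns a list of (n, (x, y)) tuples where n is the number represented by that cell.
--     In odds_mode, only odd numbers are mapped, and the grid has half as many columns.
--     """
--     grid = []
--     if odds_mode:
--         cell_count = 0
--         for y in range(height):
--             for x in range(width):
--                 n = y*width + x + 1
--                 if n % 2 == 1:
--                     # Determine position in odd grid
--                     grid.append((n, (x//2, y)))
--     else:
--         for y in range(height):
--             for x in range(width):
--                 n = y*width + x + 1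
--                 grid.append((n, (x, y)))
--     return grid
-- ===== SOURCE B (Python) =====
-- def make_grid_indices(width, height, odds_mode):
--     """
--     Returns a list of (n, (x, y)) tuples where n is the number represented by that cell.
--     In odds_mode, only odd numbers are mapped, and the grid has half as many columns.
--     """
--     if width <= 0 or height <= 0:
--         return []
--     if odds_mode:
--         return [(n, (((n - 1) % width) // 2, (n - 1) // width))
--                 for n in range(1, width * height + 1, 2)]
--     return [(n, ((n - 1) % width, (n - 1) // width))
--             for n in range(1, width * height + 1)]
-- ===== Notes on version B (the rewrite author's own statement) =====
-- stated objective: simpler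
-- what changed: Replaces A's nested (y,x) coordinate loops (multiply-add to get n, parity filter in odds_mode) by a single flat comprehension over the cell number n itself (range step 2 in odds_mode, so no parity test), recovering x and y from n with divmod.
import Mathlib
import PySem

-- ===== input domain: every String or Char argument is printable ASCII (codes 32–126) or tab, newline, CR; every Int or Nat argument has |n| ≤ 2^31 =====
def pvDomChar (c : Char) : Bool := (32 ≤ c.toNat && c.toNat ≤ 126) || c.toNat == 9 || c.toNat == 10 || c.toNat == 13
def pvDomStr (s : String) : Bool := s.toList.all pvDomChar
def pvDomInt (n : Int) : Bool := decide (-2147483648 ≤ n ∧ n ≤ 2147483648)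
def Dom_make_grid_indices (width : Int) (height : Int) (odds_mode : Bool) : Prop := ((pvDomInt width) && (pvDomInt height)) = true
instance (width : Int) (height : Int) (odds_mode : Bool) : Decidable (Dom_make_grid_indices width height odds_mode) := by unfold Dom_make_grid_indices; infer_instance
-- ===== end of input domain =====

-- B replaces A's nested (y, x) coordinate loops by a single flat loop over the cell
-- number n (step 2 in odds_mode), recovering x and y from n by divmod; same output.


-- ===== PORT A =====
-- Literal port of A: nested for-loops over y then x, appending one tuple per cell
-- (in odds_mode only when n = y*width+x+1 is odd); the dead `cell_count = 0` is dropped.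
def make_grid_indices (width : Int) (height : Int) (odds_mode : Bool) : List (Int × (Int × Int)) :=
  if odds_mode then
    (PySem.List.pyRange 0 height 1).foldl (fun grid y =>
      (PySem.List.pyRange 0 width 1).foldl (fun grid x =>
        if PySem.Int.mod (y * width + x + 1) 2 = 1 then
          grid ++ [(y * width + x + 1, (PySem.Int.floordiv x 2, y))]
        else grid) grid) []
  else
    (PySem.List.pyRange 0 height 1).foldl (fun grid y =>
      (PySem.List.pyRange 0 width 1).foldl (fun grid x =>
        grid ++ [(y * width + x + 1, (x, y))]) grid) []

-- ===== PORT B =====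
-- Literal port of Source B: guard on non-positive sizes, then one flat
-- comprehension over n (range step 2 in odds_mode), coordinates recovered by divmod.
def make_grid_indices_alt (width : Int) (height : Int) (odds_mode : Bool) : List (Int × (Int × Int)) :=
  if width ≤ 0 ∨ height ≤ 0 then []
  else if odds_mode then
    (PySem.List.pyRange 1 (width * height + 1) 2).map (fun n =>
      (n, (PySem.Int.floordiv (PySem.Int.mod (n - 1) width) 2, PySem.Int.floordiv (n - 1) width)))
  else
    (PySem.List.pyRange 1 (width * height + 1) 1).map (fun n =>
      (n, (PySem.Int.mod (n - 1) width, PySem.Int.floordiv (n - 1) width)))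

-- ===== PRECONDITION & SPEC =====
def Spec_make_grid_indices (width : Int) (height : Int) (odds_mode : Bool) (out : List (Int × (Int × Int))) : Prop := out = make_grid_indices_alt width height odds_mode
instance (width : Int) (height : Int) (odds_mode : Bool) (out : List (Int × (Int × Int))) : Decidable (Spec_make_grid_indices width height odds_mode out) := by unfold Spec_make_grid_indices; infer_instance

-- ===== CLAIM (what is proved, stated in full; the proofs are below) =====
def Claim_equal_make_grid_indices : Prop := ∀ (width : Int) (height : Int) (odds_mode : Bool), Dom_make_grid_indices width height odds_mode → Spec_make_grid_indices width height odds_mode (make_grid_indices width height odds_mode)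

-- ===== LEMMAS AND PROOFS =====

theorem pv_foldl_self {α β : Type} (l : List β) (a : α) :
    l.foldl (fun x _ => x) a = a := by
  induction l generalizing a with
  | nil => rfl
  | cons b l ih => simpa using ih a

theorem pv_mod_nonneg_den (a b : ℤ) (hb : 0 ≤ b) : PySem.Int.mod a b = a % b := by
  simp [PySem.Int.mod, Int.fmod_eq_emod, hb]

theorem pv_fdiv_nonneg_den (a b : ℤ) (hb : 0 ≤ b) : PySem.Int.floordiv a b = a / b := by
  simp [PySem.Int.floordiv, Int.fdiv_eq_ediv, hb]

-- x = (n-1) % W and y = (n-1) // W recover the coordinates from n = y*W + x + 1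
theorem pv_recover_mod (W y x : ℤ) (hW : 0 < W) (hx0 : 0 ≤ x) (hxW : x < W) :
    PySem.Int.mod (y * W + x + 1 - 1) W = x := by
  have h1 : y * W + x + 1 - 1 = x + W * y := by ring
  rw [h1, pv_mod_nonneg_den _ _ hW.le, Int.add_mul_emod_self_left, Int.emod_eq_of_lt hx0 hxW]

theorem pv_recover_div (W y x : ℤ) (hW : 0 < W) (hx0 : 0 ≤ x) (hxW : x < W) :
    PySem.Int.floordiv (y * W + x + 1 - 1) W = y := by
  have h1 : y * W + x + 1 - 1 = x + W * y := by ring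
  rw [h1, pv_fdiv_nonneg_den _ _ hW.le, Int.add_mul_ediv_left _ _ hW.ne',
      Int.ediv_eq_zero_of_lt hx0 hxW, zero_add]

-- row y of the grid, as a contiguous range of cell numbers
theorem pv_pyRange_row (W y : ℤ) :
    PySem.List.pyRange (y * W + 1) (y * W + W + 1) 1
      = (PySem.List.pyRange 0 W 1).map (fun x => y * W + x + 1) := by
  rw [PySem.List.pyRange_one, PySem.List.pyRange_one, List.map_map]
  have h1 : y * W + W + 1 - (y * W + 1) = W - 0 := by ring
  rw [h1]
  exact List.map_congr_left (fun k _ => by simp; ring)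

-- concatenating the rows gives the flat range 1 .. W*H
theorem pv_flatten_rows (W : ℤ) (hW : 0 < W) (H : ℕ) :
    (PySem.List.pyRange 0 (H : ℤ) 1).flatMap
        (fun y => PySem.List.pyRange (y * W + 1) (y * W + W + 1) 1)
      = PySem.List.pyRange 1 (W * H + 1) 1 := by
  induction H with
  | zero => simp [PySem.List.pyRange_one_eq_nil]
  | succ H ih =>
    have hc : ((H : ℕ) + 1 : ℕ) = ((H : ℤ) + 1 : ℤ) := by push_cast; ring
    rw [hc, PySem.List.pyRange_one_succ_right (by positivity), List.flatMap_append, ih]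
    have h1 : (0 : ℤ) ≤ W * H := by positivity
    have h2 : W * ((H : ℤ) + 1) + 1 = (H : ℤ) * W + W + 1 := by ring
    have h3 : W * (H : ℤ) + 1 = (H : ℤ) * W + 1 := by ring
    rw [show ((↑(H + 1) : ℤ)) = ((H : ℤ) + 1) from by push_cast; ring] at *
    rw [h2, PySem.List.pyRange_one_append 1 ((H : ℤ) * W + 1) ((H : ℤ) * W + W + 1)
          (by nlinarith) (by nlinarith), h3]
    simp

-- range(1, b, 2) is the odd members of range(1, b)
theorem pv_step2 (t : ℕ) :
    PySem.List.pyRange 1 (1 + (t : ℤ)) 2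
      = (PySem.List.pyRange 1 (1 + (t : ℤ)) 1).filter
          (fun n => decide (PySem.Int.mod n 2 = 1)) := by
  induction t with
  | zero => decide
  | succ t ih =>
    have hc : (1 : ℤ) + ((t + 1 : ℕ) : ℤ) = (1 + (t : ℤ)) + 1 := by push_cast; ring
    rw [hc, PySem.List.pyRange_one_succ_right (by omega), List.filter_append, ← ih]
    rw [PySem.List.pyRange_of_pos _ _ (by norm_num : (0:ℤ) < 2),
        PySem.List.pyRange_of_pos _ _ (by norm_num : (0:ℤ) < 2)]
    rcases Nat.even_or_odd t with ⟨m, hm⟩ | ⟨m, hm⟩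
    · -- t = 2m even: the new element 1+t is odd and gets appended on both sides
      have hcnt1 : (if (1:ℤ) < 1 + (t:ℤ) + 1 then (((1 + (t:ℤ) + 1) - 1 + 2 - 1) / 2).toNat else 0) = m + 1 := by
        rw [if_pos (by omega)]; subst hm; push_cast; omega
      have hcnt2 : (if (1:ℤ) < 1 + (t:ℤ) then (((1 + (t:ℤ)) - 1 + 2 - 1) / 2).toNat else 0) = m := by
        split_ifs with h
        · subst hm; push_cast; omega
        · subst hm; push_cast at h ⊢; omega
      have hodd : (1 + (t : ℤ)) % 2 = 1 := by subst hm; push_cast; omega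
      have hfil : List.filter (fun n => decide (PySem.Int.mod n 2 = 1)) [1 + (t:ℤ)]
          = [1 + (t:ℤ)] := by simp [List.filter_cons, pv_mod_nonneg_den, hodd]
      rw [hcnt1, hcnt2, List.range_succ, List.map_append, hfil]
      congr 1
      simp only [List.map_cons, List.map_nil, List.cons.injEq, and_true]
      subst hm; push_cast; ring
    · -- t = 2m+1 odd: the new element 1+t is even and both sides are unchanged
      have hcnt1 : (if (1:ℤ) < 1 + (t:ℤ) + 1 then (((1 + (t:ℤ) + 1) - 1 + 2 - 1) / 2).toNat else 0) = m + 1 := by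
        rw [if_pos (by omega)]; subst hm; push_cast; omega
      have hcnt2 : (if (1:ℤ) < 1 + (t:ℤ) then (((1 + (t:ℤ)) - 1 + 2 - 1) / 2).toNat else 0) = m + 1 := by
        rw [if_pos (by subst hm; push_cast; omega)]; subst hm; push_cast; omega
      have heven : (1 + (t : ℤ)) % 2 = 0 := by subst hm; push_cast; omega
      have hfil : List.filter (fun n => decide (PySem.Int.mod n 2 = 1)) [1 + (t:ℤ)]
          = [] := by simp [List.filter_cons, pv_mod_nonneg_den, heven]
      rw [hcnt1, hcnt2, hfil, List.append_nil]

theorem pv_flatMap_filter {α β : Type} (p : α → Bool) (g : β → List α) (l : List β) :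
    l.flatMap (fun b => (g b).filter p) = (l.flatMap g).filter p := by
  induction l with
  | nil => rfl
  | cons b l ih => simp [List.flatMap_cons, List.filter_append, ih]

-- A = [] when either dimension is non-positive
theorem pv_A_empty (width height : Int) (odds_mode : Bool) (h : width ≤ 0 ∨ height ≤ 0) :
    make_grid_indices width height odds_mode = [] := by
  rcases h with h | h
  · have hw : PySem.List.pyRange 0 width 1 = [] := PySem.List.pyRange_one_eq_nil h
    unfold make_grid_indices
    split <;> (rw [hw]; simp only [List.foldl_nil]; exact pv_foldl_self _ _)
  · have hh : PySem.List.pyRange 0 height 1 = [] := PySem.List.pyRange_one_eq_nil h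
    unfold make_grid_indices
    split <;> (rw [hh]; rfl)

-- main equivalence for positive dimensions, non-odds branch
theorem pv_main_nonodds (W : ℤ) (H : ℕ) (hW : 0 < W) :
    make_grid_indices W (H : ℤ) false = make_grid_indices_alt W (H : ℤ) false := by
  by_cases hH : H = 0
  · subst hH
    push_cast
    rw [pv_A_empty _ _ _ (Or.inr le_rfl)]
    simp [make_grid_indices_alt]
  · unfold make_grid_indices make_grid_indices_alt
    simp only [Bool.false_eq_true, if_false]
    rw [if_neg (by push_neg; exact ⟨hW, by exact_mod_cast Nat.pos_of_ne_zero hH⟩)]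
    simp only [PySem.List.foldl_append_singleton_eq_map, PySem.List.foldl_append_eq_flatMap,
      List.nil_append]
    have step : ∀ y ∈ PySem.List.pyRange 0 (H : ℤ) 1,
        (PySem.List.pyRange 0 W 1).map (fun x => (y * W + x + 1, (x, y)))
          = (PySem.List.pyRange (y * W + 1) (y * W + W + 1) 1).map
              (fun n => (n, (PySem.Int.mod (n - 1) W, PySem.Int.floordiv (n - 1) W))) := by
      intro y _
      rw [pv_pyRange_row, List.map_map]
      refine List.map_congr_left (fun x hx => ?_)
      rw [PySem.List.mem_pyRange_one] at hx
      simp only [Function.comp_apply]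
      rw [pv_recover_mod W y x hW hx.1 hx.2, pv_recover_div W y x hW hx.1 hx.2]
    calc (PySem.List.pyRange 0 (H : ℤ) 1).flatMap
            (fun y => (PySem.List.pyRange 0 W 1).map (fun x => (y * W + x + 1, (x, y))))
        = (PySem.List.pyRange 0 (H : ℤ) 1).flatMap
            (fun y => (PySem.List.pyRange (y * W + 1) (y * W + W + 1) 1).map
              (fun n => (n, (PySem.Int.mod (n - 1) W, PySem.Int.floordiv (n - 1) W)))) := by
          exact List.flatMap_congr (fun y hy => step y hy)
      _ = ((PySem.List.pyRange 0 (H : ℤ) 1).flatMap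
            (fun y => PySem.List.pyRange (y * W + 1) (y * W + W + 1) 1)).map
              (fun n => (n, (PySem.Int.mod (n - 1) W, PySem.Int.floordiv (n - 1) W))) := by
          rw [List.map_flatMap]
      _ = _ := by rw [pv_flatten_rows W hW H]

-- main equivalence for positive dimensions, odds branch
theorem pv_main_odds (W : ℤ) (H : ℕ) (hW : 0 < W) :
    make_grid_indices W (H : ℤ) true = make_grid_indices_alt W (H : ℤ) true := by
  by_cases hH : H = 0
  · subst hH
    push_cast
    rw [pv_A_empty _ _ _ (Or.inr le_rfl)]
    simp [make_grid_indices_alt]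
  · unfold make_grid_indices make_grid_indices_alt
    rw [if_pos rfl, if_neg (by push_neg; exact ⟨hW, by exact_mod_cast Nat.pos_of_ne_zero hH⟩),
        if_pos rfl]
    simp only [PySem.List.foldl_append_ite, PySem.List.foldl_append_eq_flatMap, List.nil_append]
    have step : ∀ y ∈ PySem.List.pyRange 0 (H : ℤ) 1,
        ((PySem.List.pyRange 0 W 1).filter
            (fun x => decide (PySem.Int.mod (y * W + x + 1) 2 = 1))).map
          (fun x => (y * W + x + 1, (PySem.Int.floordiv x 2, y)))
          = ((PySem.List.pyRange (y * W + 1) (y * W + W + 1) 1).filter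
              (fun n => decide (PySem.Int.mod n 2 = 1))).map
              (fun n => (n, (PySem.Int.floordiv (PySem.Int.mod (n - 1) W) 2,
                             PySem.Int.floordiv (n - 1) W))) := by
      intro y _
      rw [pv_pyRange_row, List.filter_map, List.map_map]
      have hfil : ((PySem.List.pyRange 0 W 1).filter
            ((fun n => decide (PySem.Int.mod n 2 = 1)) ∘ (fun x => y * W + x + 1)))
          = ((PySem.List.pyRange 0 W 1).filter
            (fun x => decide (PySem.Int.mod (y * W + x + 1) 2 = 1))) := rfl
      rw [hfil]
      refine List.map_congr_left (fun x hx => ?_)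
      have hx' := List.mem_of_mem_filter hx
      rw [PySem.List.mem_pyRange_one] at hx'
      simp only [Function.comp_apply]
      rw [pv_recover_mod W y x hW hx'.1 hx'.2, pv_recover_div W y x hW hx'.1 hx'.2]
    have hWH : (0 : ℤ) ≤ W * H := by positivity
    calc (PySem.List.pyRange 0 (H : ℤ) 1).flatMap
            (fun y => ((PySem.List.pyRange 0 W 1).filter
              (fun x => decide (PySem.Int.mod (y * W + x + 1) 2 = 1))).map
              (fun x => (y * W + x + 1, (PySem.Int.floordiv x 2, y))))
        = (PySem.List.pyRange 0 (H : ℤ) 1).flatMap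
            (fun y => ((PySem.List.pyRange (y * W + 1) (y * W + W + 1) 1).filter
              (fun n => decide (PySem.Int.mod n 2 = 1))).map
              (fun n => (n, (PySem.Int.floordiv (PySem.Int.mod (n - 1) W) 2,
                             PySem.Int.floordiv (n - 1) W)))) := by
          exact List.flatMap_congr (fun y hy => step y hy)
      _ = (((PySem.List.pyRange 0 (H : ℤ) 1).flatMap
            (fun y => PySem.List.pyRange (y * W + 1) (y * W + W + 1) 1)).filter
              (fun n => decide (PySem.Int.mod n 2 = 1))).map
              (fun n => (n, (PySem.Int.floordiv (PySem.Int.mod (n - 1) W) 2,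
                             PySem.Int.floordiv (n - 1) W))) := by
          rw [← pv_flatMap_filter, List.map_flatMap]
      _ = _ := by
          rw [pv_flatten_rows W hW H,
              show W * (H : ℤ) + 1 = 1 + (((W * (H : ℤ)).toNat : ℕ) : ℤ) from by omega,
              ← pv_step2 ((W * (H : ℤ)).toNat)]

-- ===== VERDICT (by name: the statement is the Claim_ definition above) =====
theorem make_grid_indices_spec : Claim_equal_make_grid_indices := by
  intro width height odds_mode _
  unfold Spec_make_grid_indices
  by_cases h : width ≤ 0 ∨ height ≤ 0
  · rw [pv_A_empty _ _ _ h]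
    unfold make_grid_indices_alt
    rw [if_pos h]
  · push_neg at h
    obtain ⟨hW, hH⟩ := h
    have hcast : height = ((height.toNat : ℕ) : ℤ) := by omega
    rw [hcast]
    cases odds_mode
    · exact pv_main_nonodds width height.toNat hW
    · exact pv_main_odds width height.toNat hW
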